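-- pv_equiv track=rewrite | github.com/GummyCap/SOP | kaprob/pr07_pyramid/pyramid.py | make_pyramid
-- ===== SOURCE A (Python) =====
-- def make_pyramid(base: int, char: str) -> list:
--     """
--     Construct a pyramid with given base.
--
--     Pyramid should consist of given chars, all empty spaces in the pyramid list are ' '. Pyramid height depends on
--     base length. Lowest floor consists of base-number chars. Every floor has 2 chars less than the floor lower to it.
--     make_pyramid(3, "A") -> [ [' ', 'A', ' '], ['A', 'A', 'A'] ] make_pyramid(6, 'a') -> [ [' ', ' ', 'a', 'a', ' ',
--     ' '], [' ', 'a', 'a', 'a', 'a', ' '], ['a', 'a', 'a', 'a', 'a', 'a'] ] :param base: int :param char: str :return: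
--     list
--     """
--     height = 0
--     if base % 2 == 0:
--         height = base // 2
--     else:
--         height = (base // 2) + 1
--     pyramid = [
--         [(char if j == 0 else ' ' if j > i < base - j else ' ' if i > base - 1 - j else char) for i in range(base)] for
--         j in range(height)]
--     pyramid.reverse()
--     return pyramid
--     pass
-- ===== SOURCE B (Python) =====
-- def make_pyramid(base: int, char: str) -> list:
--     height = (base + 1) // 2
--     rows = []
--     count = base - 2 * (height - 1)
--     for _ in range(height):
--         pad = (base - count) // 2
--         rows.append([' '] * pad + [char] * count + [' '] * pad)
--         count += 2
--     return rows
-- ===== Notes on version B (the rewrite author's own statement) =====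
-- stated objective: simpler
-- what changed: Replaces the per-cell boolean predicate comprehension (with a final reverse) by direct segment arithmetic: rows are built top-to-bottom as pad*[' '] + count*[char] + pad*[' '] with count growing by 2, no per-cell tests and no reverse.
import Mathlib
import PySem

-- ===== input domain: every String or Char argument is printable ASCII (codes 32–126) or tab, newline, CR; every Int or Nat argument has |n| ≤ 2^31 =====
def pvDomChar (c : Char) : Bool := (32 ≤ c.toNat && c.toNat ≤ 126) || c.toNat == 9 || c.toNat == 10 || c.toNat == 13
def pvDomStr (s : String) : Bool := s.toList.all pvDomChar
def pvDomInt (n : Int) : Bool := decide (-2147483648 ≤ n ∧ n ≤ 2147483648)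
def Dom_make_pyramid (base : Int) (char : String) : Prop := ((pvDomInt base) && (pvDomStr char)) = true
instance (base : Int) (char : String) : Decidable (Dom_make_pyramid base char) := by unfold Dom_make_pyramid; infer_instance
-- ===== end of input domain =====

-- B builds each pyramid row top-to-bottom from segment lengths (pad spaces, count chars, pad spaces)
-- instead of A's per-cell boolean predicate plus a final reverse: simpler decomposition, same cost.


-- ===== PORT A =====
def make_pyramid (base : Int) (char : String) : List (List String) :=
  let height : Int :=
    if PySem.Int.mod base 2 == 0 then PySem.Int.floordiv base 2
    else PySem.Int.floordiv base 2 + 1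
  let pyramid :=
    (PySem.List.pyRange 0 height 1).map (fun j =>
      (PySem.List.pyRange 0 base 1).map (fun i =>
        if j == 0 then char
        else if j > i ∧ i < base - j then " "
        else if i > base - 1 - j then " "
        else char))
  pyramid.reverse

-- ===== PORT B =====
-- one row: pad spaces, count chars, pad spaces ([x]*n with n < 0 is [] in Python; Int.toNat is exact for that)
def pyramidRow (base count : Int) (char : String) : List String :=
  let pad := PySem.Int.floordiv (base - count) 2
  List.replicate pad.toNat " " ++ List.replicate count.toNat char ++ List.replicate pad.toNat " "

def make_pyramid_alt (base : Int) (char : String) : List (List String) :=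
  let height := PySem.Int.floordiv (base + 1) 2
  ((PySem.List.pyRange 0 height 1).foldl
      (fun (st : List (List String) × Int) _ => (st.1 ++ [pyramidRow base st.2 char], st.2 + 2))
      ([], base - 2 * (height - 1))).1

-- ===== PRECONDITION & SPEC =====
def Spec_make_pyramid (base : Int) (char : String) (out : List (List String)) : Prop := out = make_pyramid_alt base char
instance (base : Int) (char : String) (out : List (List String)) : Decidable (Spec_make_pyramid base char out) := by unfold Spec_make_pyramid; infer_instance

-- ===== CLAIM (what is proved, stated in full; the proofs are below) =====
def Claim_equal_make_pyramid : Prop := ∀ (base : Int) (char : String), Dom_make_pyramid base char → Spec_make_pyramid base char (make_pyramid base char)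

-- ===== LEMMAS AND PROOFS =====

-- A's two-branch height equals B's (base+1)//2
lemma heightA_eq (base : Int) :
    (if PySem.Int.mod base 2 == 0 then PySem.Int.floordiv base 2
     else PySem.Int.floordiv base 2 + 1) = PySem.Int.floordiv (base + 1) 2 := by
  rw [PySem.Int.mod_eq_emod_of_pos (by norm_num : (0:ℤ) < 2),
      PySem.Int.floordiv_eq_ediv_of_pos (a := base) (by norm_num : (0:ℤ) < 2),
      PySem.Int.floordiv_eq_ediv_of_pos (a := base + 1) (by norm_num : (0:ℤ) < 2)]
  simp only [beq_iff_eq]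
  split_ifs with h <;> omega

-- A's row j, for 0 ≤ j and 2j < base, is exactly the three segments
lemma rowA_eq (base j : Int) (char : String) (h0 : 0 ≤ j) (h2 : 2 * j < base) :
    (PySem.List.pyRange 0 base 1).map (fun i =>
        if j == 0 then char
        else if j > i ∧ i < base - j then " "
        else if i > base - 1 - j then " "
        else char)
    = List.replicate j.toNat " " ++ List.replicate (base - 2 * j).toNat char ++ List.replicate j.toNat " " := by
  apply List.ext_getElem
  · simp [PySem.List.length_pyRange_one]; omega
  · intro k hk1 hk2
    simp only [List.getElem_map, PySem.List.getElem_pyRange_one, zero_add, beq_iff_eq]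
    simp only [List.length_map, PySem.List.length_pyRange_one] at hk1
    simp only [List.getElem_append, List.getElem_replicate, List.length_append,
      List.length_replicate]
    simp only [sub_zero] at hk1
    split_ifs <;> first | rfl | omega

-- B's loop unrolled: it appends one pyramidRow per step, count advancing by 2
lemma bloop (base : Int) (char : String) (m : Nat) (acc : List (List String)) (c : Int) :
    (PySem.List.pyRange 0 (m : Int) 1).foldl
      (fun (st : List (List String) × Int) _ => (st.1 ++ [pyramidRow base st.2 char], st.2 + 2))
      (acc, c)
    = (acc ++ (List.range m).map (fun k : Nat => pyramidRow base (c + 2 * (k : Int)) char), c + 2 * m) := by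
  induction m generalizing acc c with
  | zero => simp [PySem.List.pyRange_one_eq_nil]
  | succ n ih =>
      have h1 : ((n + 1 : Nat) : Int) = (n : Int) + 1 := by push_cast; ring
      rw [h1, PySem.List.pyRange_one_succ_right (by positivity), List.foldl_append, ih]
      simp only [List.foldl_cons, List.foldl_nil, List.range_succ, List.map_append,
        List.map_cons, List.map_nil, List.append_assoc, Prod.mk.injEq]
      refine ⟨trivial, ?_⟩
      omega

theorem make_pyramid_spec : Claim_equal_make_pyramid := by
  intro base char _
  unfold Spec_make_pyramid make_pyramid make_pyramid_alt
  simp only [heightA_eq]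
  set h : Int := PySem.Int.floordiv (base + 1) 2 with hh
  by_cases hb : 0 < base
  · have hdiv : h = (base + 1) / 2 := by
      rw [hh, PySem.Int.floordiv_eq_ediv_of_pos (by norm_num : (0:ℤ) < 2)]
    have hpos : 0 < h := by omega
    have hcast : ((h.toNat : Int)) = h := by omega
    rw [← hcast, bloop]
    have houter : PySem.List.pyRange 0 ((h.toNat : Int)) 1
        = (List.range h.toNat).map (fun k : Nat => (k : Int)) := by
      rw [PySem.List.pyRange_one]; simp
      congr 2
      omega
    rw [houter, List.map_map]
    apply List.ext_getElem
    · simp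
    · intro k hk1 hk2
      simp only [List.length_reverse, List.length_map, List.length_range] at hk1
      rw [List.getElem_reverse]
      simp only [List.getElem_map, List.getElem_range, List.length_map, List.length_range,
        List.nil_append, Function.comp_apply]
      set j : Nat := h.toNat - 1 - k with hj
      have hjlt : 2 * (j : Int) < base := by omega
      rw [rowA_eq base (j : Int) char (by positivity) hjlt]
      unfold pyramidRow
      have hcount : base - 2 * ((h.toNat : Int) - 1) + 2 * (k : Int) = base - 2 * (j : Int) := by
        omega
      rw [hcount]
      have hpad : PySem.Int.floordiv (base - (base - 2 * (j : Int))) 2 = (j : Int) := by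
        rw [PySem.Int.floordiv_eq_ediv_of_pos (by norm_num : (0:ℤ) < 2)]; omega
      rw [hpad]
  · have hle : h ≤ 0 := by
      rw [hh, PySem.Int.floordiv_eq_ediv_of_pos (by norm_num : (0:ℤ) < 2)]; omega
    rw [PySem.List.pyRange_one_eq_nil hle]
    simp
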